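-- pv_equiv track=rewrite | github.com/Lmraza98/hello | services/browser_skills/store.py | _url_match_score
-- ===== SOURCE A (Python) =====
-- def _url_match_score(url: str, domain_patterns: list[str]) -> int:
--     if not url:
--         return 0
--     lower_url = url.lower()
--     best = 0
--     for pattern in domain_patterns:
--         p = str(pattern or "").strip().lower()
--         if not p:
--             continue
--         if lower_url == p:
--             best = max(best, 100)
--             continue
--         if p in lower_url:
--             best = max(best, 70)
--     return best
-- ===== SOURCE B (Python) =====
-- def _url_match_score(url: str, domain_patterns: list[str]) -> int:
--     cleaned = [s for p in domain_patterns if (s := str(p or "").strip().lower())]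
--     if not url:
--         return 0
--     lower_url = url.lower()
--     if lower_url in cleaned:
--         return 100
--     if any(p in lower_url for p in cleaned):
--         return 70
--     return 0
-- ===== Notes on version B (the rewrite author's own statement) =====
-- stated objective: simpler
-- what changed: Replaces A's single max-tracking loop with a normalization pass building the cleaned pattern list followed by two priority-ordered existence checks (exact membership, then any-substring), which short-circuit on the first hit instead of scoring every pattern.
import Mathlib
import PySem

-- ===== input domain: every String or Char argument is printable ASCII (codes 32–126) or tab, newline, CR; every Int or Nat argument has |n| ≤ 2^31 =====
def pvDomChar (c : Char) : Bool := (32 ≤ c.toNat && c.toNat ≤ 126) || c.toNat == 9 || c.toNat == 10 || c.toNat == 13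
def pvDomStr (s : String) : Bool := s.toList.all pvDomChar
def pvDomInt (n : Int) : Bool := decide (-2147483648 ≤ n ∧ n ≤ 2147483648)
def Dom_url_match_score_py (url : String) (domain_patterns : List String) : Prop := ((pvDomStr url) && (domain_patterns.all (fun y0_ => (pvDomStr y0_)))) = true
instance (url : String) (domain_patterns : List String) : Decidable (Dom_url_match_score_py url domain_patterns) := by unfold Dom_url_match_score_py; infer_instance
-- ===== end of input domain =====

-- B replaces A's single max-tracking loop with a cleaned-pattern precompute plus two
-- priority-ordered existence checks (objective: simpler).

-- ===== PORT A =====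
def url_match_score_py (url : String) (domain_patterns : List String) : Int :=
  if url = "" then 0
  else
    let lower_url := PySem.Str.lower url
    domain_patterns.foldl (fun best pattern =>
      let p := PySem.Str.lower (PySem.Str.strip pattern)
      if p = "" then best
      else if lower_url = p then max best 100
      else if PySem.Str.isIn p lower_url then max best 70
      else best) 0

-- ===== PORT B =====
def url_match_score_py_alt (url : String) (domain_patterns : List String) : Int :=
  let cleaned := domain_patterns.filterMap (fun p =>
    let s := PySem.Str.lower (PySem.Str.strip p)
    if s = "" then none else some s)
  if url = "" then 0
  else
    let lower_url := PySem.Str.lower url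
    if lower_url ∈ cleaned then 100
    else if cleaned.any (fun p => PySem.Str.isIn p lower_url) then 70
    else 0

-- ===== PRECONDITION & SPEC =====
def Spec_url_match_score_py (url : String) (domain_patterns : List String) (out : Int) : Prop := out = url_match_score_py_alt url domain_patterns
instance (url : String) (domain_patterns : List String) (out : Int) : Decidable (Spec_url_match_score_py url domain_patterns out) := by unfold Spec_url_match_score_py; infer_instance

-- ===== CLAIM (what is proved, stated in full; the proofs are below) =====
def Claim_equal_url_match_score_py : Prop := ∀ (url : String) (domain_patterns : List String), Dom_url_match_score_py url domain_patterns → Spec_url_match_score_py url domain_patterns (url_match_score_py url domain_patterns)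

-- ===== LEMMAS AND PROOFS =====

def pvNorm (p : String) : String := PySem.Str.lower (PySem.Str.strip p)

def pvCleaned (pats : List String) : List String :=
  pats.filterMap (fun p => if pvNorm p = "" then none else some (pvNorm p))

-- B's score for a fixed lowered url (the tail of B's computation, let-free).
def pvAltScore (lu : String) (pats : List String) : Int :=
  if lu ∈ pvCleaned pats then 100
  else if (pvCleaned pats).any (fun p => PySem.Str.isIn p lu) then 70
  else 0

-- A's loop body, let-free (definitionally equal to the lambda in the port).
def pvStepA (lu : String) (best : Int) (pattern : String) : Int :=
  if pvNorm pattern = "" then best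
  else if lu = pvNorm pattern then max best 100
  else if PySem.Str.isIn (pvNorm pattern) lu then max best 70
  else best

lemma pvAltScore_nonneg (lu : String) (pats : List String) : 0 ≤ pvAltScore lu pats := by
  unfold pvAltScore; split_ifs <;> omega

lemma pvAltScore_le (lu : String) (pats : List String) : pvAltScore lu pats ≤ 100 := by
  unfold pvAltScore; split_ifs <;> omega

lemma pvCleaned_cons (q : String) (pats : List String) :
    pvCleaned (q :: pats) =
      if pvNorm q = "" then pvCleaned pats else pvNorm q :: pvCleaned pats := by
  unfold pvCleaned
  rw [List.filterMap_cons]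
  split_ifs with h <;> simp

lemma pvFold_eq_max (lu : String) (pats : List String) (b : Int) (hb : 0 ≤ b) :
    pats.foldl (pvStepA lu) b = max b (pvAltScore lu pats) := by
  induction pats generalizing b with
  | nil => simp [pvAltScore, pvCleaned]; omega
  | cons q pats ih =>
    rw [List.foldl_cons, ih _ ?pos]
    case pos => unfold pvStepA; split_ifs <;> omega
    unfold pvStepA
    by_cases h0 : pvNorm q = ""
    · rw [if_pos h0]
      have : pvAltScore lu (q :: pats) = pvAltScore lu pats := by
        unfold pvAltScore; rw [pvCleaned_cons, if_pos h0]
      rw [this]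
    · rw [if_neg h0]
      have hc := pvCleaned_cons q pats
      rw [if_neg h0] at hc
      by_cases h1 : lu = pvNorm q
      · rw [if_pos h1]
        have h100 : pvAltScore lu (q :: pats) = 100 := by
          unfold pvAltScore
          rw [if_pos (by rw [hc, h1]; exact List.mem_cons_self)]
        have := pvAltScore_le lu pats
        rw [h100]; omega
      · rw [if_neg h1]
        have hmem : lu ∈ pvCleaned (q :: pats) ↔ lu ∈ pvCleaned pats := by
          rw [hc, List.mem_cons]
          exact or_iff_right h1
        by_cases h2 : PySem.Str.isIn (pvNorm q) lu
        · rw [if_pos h2]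
          by_cases h3 : lu ∈ pvCleaned pats
          · have hA : pvAltScore lu pats = 100 := by unfold pvAltScore; rw [if_pos h3]
            have hB : pvAltScore lu (q :: pats) = 100 := by
              unfold pvAltScore; rw [if_pos (hmem.mpr h3)]
            rw [hA, hB]; omega
          · have hA : pvAltScore lu pats ≤ 70 := by
              unfold pvAltScore; rw [if_neg h3]; split_ifs <;> omega
            have hA' := pvAltScore_nonneg lu pats
            have hB : pvAltScore lu (q :: pats) = 70 := by
              unfold pvAltScore
              rw [if_neg (fun h => h3 (hmem.mp h)), if_pos]
              rw [hc, List.any_cons, h2]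
              simp
            rw [hB]; omega
        · rw [if_neg h2]
          have hany : (pvCleaned (q :: pats)).any (fun p => PySem.Str.isIn p lu) =
              (pvCleaned pats).any (fun p => PySem.Str.isIn p lu) := by
            rw [hc]
            simp only [List.any_cons]
            rw [show PySem.Str.isIn (pvNorm q) lu = false from
              eq_false_of_ne_true (by simpa using h2), Bool.false_or]
          have : pvAltScore lu (q :: pats) = pvAltScore lu pats := by
            unfold pvAltScore
            rw [if_congr hmem rfl rfl, hany]
          rw [this]

-- ===== VERDICT (by name: the statement is the Claim_ definition above) =====
theorem url_match_score_py_spec : Claim_equal_url_match_score_py := by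
  intro url pats _
  unfold Spec_url_match_score_py
  have hA : url_match_score_py url pats =
      if url = "" then 0 else pats.foldl (pvStepA (PySem.Str.lower url)) 0 := rfl
  have hB : url_match_score_py_alt url pats =
      if url = "" then 0 else pvAltScore (PySem.Str.lower url) pats := rfl
  rw [hA, hB]
  by_cases h : url = ""
  · rw [if_pos h, if_pos h]
  · rw [if_neg h, if_neg h, pvFold_eq_max _ _ 0 le_rfl,
      max_eq_right (pvAltScore_nonneg _ _)]
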